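-- pv_equiv track=rewrite | github.com/NREL/EnergyPlus | doc/tools/parse_output_variables.py | get_level_zero_comma_locations
-- ===== SOURCE A (Python) =====
-- def get_level_zero_comma_locations(line):
--     current_char_location = -1
--     current_parentheses_level = 0
--     level_zero_comma_locations = []
--     for char in line:
--         current_char_location += 1
--         if char == ',' and current_parentheses_level == 0:
--             level_zero_comma_locations.append(current_char_location)
--         elif char == '(':
--             current_parentheses_level += 1
--         elif char == ')':
--             current_parentheses_level -= 1
--             # print "Character: " + char + "; paren_level: " + str(current_parentheses_level)
--             # print (char + " : " + str(level_zero_comma_locations) )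
--     return level_zero_comma_locations
-- ===== SOURCE B (Python) =====
-- def get_level_zero_comma_locations(line):
--     # Pass 1: depth profile — depths[i] is the parenthesis level BEFORE line[i].
--     depths = []
--     d = 0
--     for ch in line:
--         depths.append(d)
--         if ch == '(':
--             d += 1
--         elif ch == ')':
--             d -= 1
--     # Pass 2: collect positions of commas at level zero.
--     return [i for i, (ch, dep) in enumerate(zip(line, depths)) if ch == ',' and dep == 0]
-- ===== Notes on version B (the rewrite author's own statement) =====
-- stated objective: alternative
-- what changed: Replaces the single fused loop carrying (position, depth, accumulator) state by a two-pass decomposition: first a depth-profile table (level before each character), then a comprehension filtering enumerate(zip(line, depths)) for level-zero commas.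
import Mathlib
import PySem

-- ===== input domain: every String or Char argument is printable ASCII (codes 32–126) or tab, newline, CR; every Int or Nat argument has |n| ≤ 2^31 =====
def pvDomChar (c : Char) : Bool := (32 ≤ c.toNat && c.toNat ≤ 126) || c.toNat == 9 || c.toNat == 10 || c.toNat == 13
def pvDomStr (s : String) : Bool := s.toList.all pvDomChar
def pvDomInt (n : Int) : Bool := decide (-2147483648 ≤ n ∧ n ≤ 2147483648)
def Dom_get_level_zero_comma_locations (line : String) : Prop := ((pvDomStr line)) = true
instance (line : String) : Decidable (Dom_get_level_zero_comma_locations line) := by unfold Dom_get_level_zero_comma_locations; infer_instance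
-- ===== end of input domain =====

-- B replaces A's fused position/depth/accumulator loop by a two-pass decomposition
-- (depth-profile table, then a filtering pass over enumerate(zip)); same cost, alternative structure.


-- ===== PORT A =====
-- A's loop: state (current_char_location, current_parentheses_level, level_zero_comma_locations)
def gzLoopA : List Char → Int → Int → List Int → List Int
  | [], _, _, acc => acc
  | c :: cs, loc, d, acc =>
    let loc' := loc + 1
    if c = ',' ∧ d = 0 then gzLoopA cs loc' d (acc ++ [loc'])
    else if c = '(' then gzLoopA cs loc' (d + 1) acc
    else if c = ')' then gzLoopA cs loc' (d - 1) acc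
    else gzLoopA cs loc' d acc

def get_level_zero_comma_locations (line : String) : List Int :=
  gzLoopA line.toList (-1) 0 []

-- ===== PORT B =====
-- B's pass 1: depth before each character
def gzDepths : List Char → Int → List Int
  | [], _ => []
  | c :: cs, d =>
    d :: gzDepths cs (if c = '(' then d + 1 else if c = ')' then d - 1 else d)

def get_level_zero_comma_locations_alt (line : String) : List Int :=
  let depths := gzDepths line.toList 0
  ((PySem.List.enumerate (line.toList.zip depths) 0).filter
      (fun p => p.2.1 == ',' && p.2.2 == 0)).map (fun p => p.1)

-- ===== PRECONDITION & SPEC =====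
def Spec_get_level_zero_comma_locations (line : String) (out : List Int) : Prop := out = get_level_zero_comma_locations_alt line
instance (line : String) (out : List Int) : Decidable (Spec_get_level_zero_comma_locations line out) := by unfold Spec_get_level_zero_comma_locations; infer_instance

-- ===== CLAIM (what is proved, stated in full; the proofs are below) =====
def Claim_equal_get_level_zero_comma_locations : Prop := ∀ (line : String), Dom_get_level_zero_comma_locations line → Spec_get_level_zero_comma_locations line (get_level_zero_comma_locations line)

-- ===== LEMMAS AND PROOFS =====
-- common characterisation: level-zero comma positions of cs, starting at index i with depth d
def gzSpecFn : List Char → Int → Int → List Int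
  | [], _, _ => []
  | c :: cs, i, d =>
    if c = ',' ∧ d = 0 then i :: gzSpecFn cs (i + 1) d
    else gzSpecFn cs (i + 1) (if c = '(' then d + 1 else if c = ')' then d - 1 else d)

theorem gzLoopA_eq : ∀ (cs : List Char) (loc d : Int) (acc : List Int),
    gzLoopA cs loc d acc = acc ++ gzSpecFn cs (loc + 1) d := by
  intro cs
  induction cs with
  | nil => intro loc d acc; simp [gzLoopA, gzSpecFn]
  | cons c cs ih =>
    intro loc d acc
    by_cases h1 : c = ',' ∧ d = 0
    · simp [gzLoopA, gzSpecFn, h1, ih]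
    · by_cases h2 : c = '('
      · simp [gzLoopA, gzSpecFn, h1, h2, ih]
      · by_cases h3 : c = ')'
        · simp [gzLoopA, gzSpecFn, h1, h2, h3, ih]
        · simp [gzLoopA, gzSpecFn, h1, h2, h3, ih]

theorem gzAlt_eq : ∀ (cs : List Char) (d s : Int),
    ((PySem.List.enumerate (cs.zip (gzDepths cs d)) s).filter
        (fun p => p.2.1 == ',' && p.2.2 == 0)).map (fun p => p.1) = gzSpecFn cs s d := by
  intro cs
  induction cs with
  | nil => intro d s; simp [gzDepths, gzSpecFn, PySem.List.enumerate]
  | cons c cs ih =>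
    intro d s
    by_cases h1 : c = ',' ∧ d = 0
    · obtain ⟨hc, hd⟩ := h1
      subst hc hd
      simp [gzDepths, gzSpecFn, PySem.List.enumerate_cons, ih]
    · have hb : ¬ (c == ',' && d == 0) = true := by
        simp only [Bool.and_eq_true, beq_iff_eq]
        exact h1
      simp [gzDepths, gzSpecFn, PySem.List.enumerate_cons, hb, h1, ih]

-- ===== VERDICT (by name: the statement is the Claim_ definition above) =====
theorem get_level_zero_comma_locations_spec : Claim_equal_get_level_zero_comma_locations := by
  intro line _
  unfold Spec_get_level_zero_comma_locations get_level_zero_comma_locations get_level_zero_comma_locations_alt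
  rw [gzLoopA_eq, gzAlt_eq]
  norm_num
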